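-- pv_equiv track=rewrite | github.com/Korred/Simple-Interpreter | Blatt 2/blatt02.py | compute_word_occurences
-- ===== SOURCE A (Python) =====
-- def compute_word_occurences(text):
--     words = text.split()
--     nest = dict()
--     for i in range(len(words)):
--         if i + 1 < len(words):
--             curr = words[i]
--             foll = words[i + 1]
--             if curr not in nest:
--                 nest[curr] = dict()
--             if foll not in nest[curr]:
--                 nest[curr][foll] = 0
--             nest[curr][foll] += 1
--     return nest
-- ===== SOURCE B (Python) =====
-- def compute_word_occurences(text):
--     words = text.split()
--     counts = {}
--     for pair in zip(words, words[1:]):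
--         counts[pair] = counts.get(pair, 0) + 1
--     nest = {}
--     for (curr, foll), n in counts.items():
--         inner = nest.get(curr, {})
--         inner[foll] = n
--         nest[curr] = inner
--     return nest
-- ===== Notes on version B (the rewrite author's own statement) =====
-- stated objective: alternative
-- what changed: B first counts consecutive word pairs into a single flat dict keyed by (curr, foll) tuples, then reshapes those counted items into the nested dict in a second pass, instead of A's single index loop that increments counters inside the nested dict as it goes.
import Mathlib
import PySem

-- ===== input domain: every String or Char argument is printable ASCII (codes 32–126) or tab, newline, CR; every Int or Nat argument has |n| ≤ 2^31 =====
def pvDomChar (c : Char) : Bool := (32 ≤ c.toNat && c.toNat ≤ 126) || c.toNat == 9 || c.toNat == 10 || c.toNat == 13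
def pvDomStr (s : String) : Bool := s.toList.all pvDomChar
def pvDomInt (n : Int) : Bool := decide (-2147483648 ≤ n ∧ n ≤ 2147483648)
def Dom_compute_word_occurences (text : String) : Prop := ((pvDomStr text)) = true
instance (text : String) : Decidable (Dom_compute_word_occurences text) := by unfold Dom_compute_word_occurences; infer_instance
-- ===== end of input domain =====

-- B counts consecutive word pairs into one flat dict first and reshapes it into the nested
-- dict in a second pass, instead of A's single index loop incrementing inside the nested dict;
-- objective: alternative decomposition (same asymptotic cost).

-- ===== PORT A =====
-- Under the guard i + 1 < len(words) both indices i and i+1 are in range, so pyGetD is exact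
-- (Python's words[i] cannot raise here).
def compute_word_occurences (text : String) : List (String × List (String × Int)) :=
  let words := PySem.Str.split₀ text
  let nest : PySem.Dict String (PySem.Dict String Int) :=
    (PySem.List.pyRange 0 (PySem.List.len words) 1).foldl (fun nest i =>
      if i + 1 < PySem.List.len words then
        let curr := PySem.List.pyGetD words i ""
        let foll := PySem.List.pyGetD words (i + 1) ""
        let nest := if !nest.contains curr then nest.insert curr PySem.Dict.empty else nest
        let d := nest.getD curr PySem.Dict.empty
        let nest := if !d.contains foll then nest.insert curr (d.insert foll 0) else nest
        let d2 := nest.getD curr PySem.Dict.empty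
        nest.insert curr (d2.insert foll (d2.getD foll 0 + 1))
      else nest) PySem.Dict.empty
  nest.items.map (fun p => (p.1, p.2.items))

-- ===== PORT B =====
def compute_word_occurences_alt (text : String) : List (String × List (String × Int)) :=
  let words := PySem.Str.split₀ text
  let counts : PySem.Dict (String × String) Int :=
    (words.zip (PySem.List.slice words (some 1) none)).foldl
      (fun counts pair => counts.insert pair (counts.getD pair 0 + 1)) PySem.Dict.empty
  let nest : PySem.Dict String (PySem.Dict String Int) :=
    counts.items.foldl (fun nest q =>
      let inner := nest.getD q.1.1 PySem.Dict.empty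
      nest.insert q.1.1 (inner.insert q.1.2 q.2)) PySem.Dict.empty
  nest.items.map (fun p => (p.1, p.2.items))

-- ===== PRECONDITION & SPEC =====
def Spec_compute_word_occurences (text : String) (out : List (String × List (String × Int))) : Prop := out = compute_word_occurences_alt text
instance (text : String) (out : List (String × List (String × Int))) : Decidable (Spec_compute_word_occurences text out) := by unfold Spec_compute_word_occurences; infer_instance

-- ===== CLAIM (what is proved, stated in full; the proofs are below) =====
def Claim_equal_compute_word_occurences : Prop := ∀ (text : String), Dom_compute_word_occurences text → Spec_compute_word_occurences text (compute_word_occurences text)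

-- ===== LEMMAS AND PROOFS =====

-- Abbreviation for the nested-dict state both loops maintain.
abbrev NDict := PySem.Dict String (PySem.Dict String Int)

-- `nest[c][f] = w` as one value-level operation.
def setv (nest : NDict) (c f : String) (w : Int) : NDict :=
  nest.insert c ((nest.getD c PySem.Dict.empty).insert f w)

-- B's reshape step.
def rstep (nest : NDict) (q : (String × String) × Int) : NDict :=
  setv nest q.1.1 q.1.2 q.2

-- A's net effect on one pair (proved below): increment nest[c][f] from default 0.
def bump (nest : NDict) (c f : String) : NDict :=
  setv nest c f ((nest.getD c PySem.Dict.empty).getD f 0 + 1)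

-- ---- generic Dict lemmas (proved on the underlying item lists) ----

theorem pv_getD_of_not_contains {κ ν : Type} [BEq κ] [LawfulBEq κ]
    (d : PySem.Dict κ ν) (k : κ) (x : ν) (h : d.contains k = false) : d.getD k x = x := by
  unfold PySem.Dict.getD
  rw [(PySem.Dict.get?_eq_none_iff_contains d k).2 h]
  rfl

theorem pv_insert_insert {κ ν : Type} [BEq κ] [LawfulBEq κ]
    (d : PySem.Dict κ ν) (k : κ) (v w : ν) : (d.insert k v).insert k w = d.insert k w := by
  by_cases h : d.contains k = true
  · have h2 : (d.insert k v).contains k = true := by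
      rw [PySem.Dict.contains_insert]; simp
    simp only [PySem.Dict.insert, h, if_true] at h2 ⊢
    rw [if_pos h2]
    apply PySem.Dict.ext
    simp only [List.map_map]
    apply List.map_congr_left
    intro p _
    by_cases hp : p.1 == k
    · simp [hp]
    · simp [hp]
  · have hb : d.contains k = false := by simpa using h
    have h2 : (d.insert k v).contains k = true := by
      rw [PySem.Dict.contains_insert]; simp
    simp only [PySem.Dict.insert, hb, Bool.false_eq_true, if_false] at h2 ⊢
    rw [if_pos h2]
    apply PySem.Dict.ext
    have hall : ∀ p ∈ d.items, (p.1 == k) = false := by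
      intro p hp
      by_contra hcon
      have : d.contains k = true := by
        unfold PySem.Dict.contains
        exact List.any_eq_true.2 ⟨p, hp, by simpa using hcon⟩
      rw [this] at hb; cases hb
    simp only [List.map_append]
    rw [List.map_congr_left (fun p hp => by rw [if_neg]; simp [hall p hp])]
    simp

theorem pv_insert_comm {κ ν : Type} [BEq κ] [LawfulBEq κ]
    (d : PySem.Dict κ ν) {k k' : κ} (v v' : ν) (h : d.contains k = true) (hne : k ≠ k') :
    (d.insert k v).insert k' v' = (d.insert k' v').insert k v := by
  have hkk' : (k == k') = false := by simpa using hne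
  have hk'k : (k' == k) = false := by simp; exact fun hh => hne hh.symm
  by_cases h' : d.contains k' = true
  · have c1 : (d.insert k v).contains k' = true := by
      rw [PySem.Dict.contains_insert, h']; simp
    have c2 : (d.insert k' v').contains k = true := by
      rw [PySem.Dict.contains_insert, h]; simp
    simp only [PySem.Dict.insert, h, h', if_true] at c1 c2 ⊢
    rw [if_pos c1, if_pos c2]
    apply PySem.Dict.ext
    simp only [List.map_map]
    apply List.map_congr_left
    intro p _
    by_cases hp : p.1 == k
    · have hpe : p.1 = k := by simpa using hp
      simp [Function.comp, hpe, hkk']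
    · by_cases hp' : p.1 == k'
      · have hpe : p.1 = k' := by simpa using hp'
        simp [Function.comp, hpe, hk'k]
      · simp [Function.comp, hp, hp']
  · have hb' : d.contains k' = false := by simpa using h'
    have c1 : (d.insert k v).contains k' = false := by
      rw [PySem.Dict.contains_insert, hb', hk'k]; rfl
    have c2 : (d.insert k' v').contains k = true := by
      rw [PySem.Dict.contains_insert, h]; simp
    simp only [PySem.Dict.insert, h, hb', Bool.false_eq_true, if_false, if_true] at c1 c2 ⊢
    rw [if_neg (by simp [c1]), if_pos c2]
    apply PySem.Dict.ext
    simp only [List.map_append, List.map_cons, List.map_nil]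
    rw [if_neg (by simp [hk'k])]

theorem setv_setv_same (nest : NDict) (c f : String) (v w : Int) :
    setv (setv nest c f v) c f w = setv nest c f w := by
  unfold setv
  rw [PySem.Dict.getD_insert_self, pv_insert_insert, pv_insert_insert]

theorem setv_comm (nest : NDict) (c f : String) (w : Int) (c' f' : String) (w' : Int)
    (hc : nest.contains c = true)
    (hf : (nest.getD c PySem.Dict.empty).contains f = true)
    (hne : (c, f) ≠ (c', f')) :
    setv (setv nest c f w) c' f' w' = setv (setv nest c' f' w') c f w := by
  by_cases hcc : c' = c
  · subst hcc
    have hff : f ≠ f' := by rintro rfl; exact hne rfl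
    unfold setv
    rw [PySem.Dict.getD_insert_self, PySem.Dict.getD_insert_self,
        pv_insert_insert, pv_insert_insert,
        pv_insert_comm _ _ _ hf hff]
  · unfold setv
    rw [PySem.Dict.getD_insert_of_ne _ _ _ (fun hh => hcc hh.symm),
        PySem.Dict.getD_insert_of_ne _ _ _ hcc,
        pv_insert_comm _ _ _ hc (fun hh => hcc hh.symm)]

theorem contains_rstep (nest : NDict) (q : (String × String) × Int) (c : String)
    (hc : nest.contains c = true) : (rstep nest q).contains c = true := by
  unfold rstep setv
  rw [PySem.Dict.contains_insert, hc]
  simp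

theorem contains_inner_rstep (nest : NDict) (q : (String × String) × Int) (c f : String)
    (_hc : nest.contains c = true)
    (hf : (nest.getD c PySem.Dict.empty).contains f = true) :
    ((rstep nest q).getD c PySem.Dict.empty).contains f = true := by
  unfold rstep setv
  by_cases hq : q.1.1 = c
  · rw [hq, PySem.Dict.getD_insert_self, PySem.Dict.contains_insert, hf]
    simp
  · rw [PySem.Dict.getD_insert_of_ne _ _ _ (fun hh => hq hh.symm)]
    exact hf

theorem L_getD (l : List ((String × String) × Int)) (nest : NDict) (c f : String)
    (h : (c, f) ∉ l.map (·.1)) :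
    ((l.foldl rstep nest).getD c PySem.Dict.empty).getD f 0
      = (nest.getD c PySem.Dict.empty).getD f 0 := by
  induction l generalizing nest with
  | nil => rfl
  | cons q l ih =>
    simp only [List.map_cons, List.mem_cons, not_or] at h
    obtain ⟨h1, h2⟩ := h
    rw [List.foldl_cons, ih _ h2]
    unfold rstep setv
    by_cases hq : q.1.1 = c
    · have hf' : q.1.2 ≠ f := by
        intro hh; apply h1; rw [← hq, ← hh]
      rw [hq, PySem.Dict.getD_insert_self,
          PySem.Dict.getD_insert_of_ne _ _ _ (fun hh => hf' hh.symm)]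
    · rw [PySem.Dict.getD_insert_of_ne _ _ _ (fun hh => hq hh.symm)]

theorem COMM (l : List ((String × String) × Int)) (nest : NDict) (c f : String) (w : Int)
    (hc : nest.contains c = true)
    (hf : (nest.getD c PySem.Dict.empty).contains f = true)
    (h : (c, f) ∉ l.map (·.1)) :
    l.foldl rstep (setv nest c f w) = setv (l.foldl rstep nest) c f w := by
  induction l generalizing nest with
  | nil => rfl
  | cons q l ih =>
    simp only [List.map_cons, List.mem_cons, not_or] at h
    obtain ⟨h1, h2⟩ := h
    rw [List.foldl_cons, List.foldl_cons]
    have hstep : rstep (setv nest c f w) q = setv (rstep nest q) c f w := by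
      have := setv_comm nest c f w q.1.1 q.1.2 q.2 hc hf (by intro hh; exact h1 (by rw [hh]))
      unfold rstep
      exact this
    rw [hstep, ih _ (contains_rstep nest q c hc) (contains_inner_rstep nest q c f hc hf) h2]

theorem RS_mid (l1 l2 : List ((String × String) × Int)) (c f : String) (v : Int)
    (h2 : (c, f) ∉ l2.map (·.1)) :
    (l1 ++ ((c, f), v + 1) :: l2).foldl rstep PySem.Dict.empty
      = bump ((l1 ++ ((c, f), v) :: l2).foldl rstep PySem.Dict.empty) c f := by
  rw [List.foldl_append, List.foldl_cons, List.foldl_append, List.foldl_cons]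
  set M := l1.foldl rstep PySem.Dict.empty with hM
  have hA : rstep M ((c, f), v + 1) = setv (rstep M ((c, f), v)) c f (v + 1) := by
    unfold rstep
    rw [setv_setv_same]
  have hc : (rstep M ((c, f), v)).contains c = true := by
    unfold rstep setv
    rw [PySem.Dict.contains_insert]
    simp
  have hf : ((rstep M ((c, f), v)).getD c PySem.Dict.empty).contains f = true := by
    unfold rstep setv
    rw [PySem.Dict.getD_insert_self, PySem.Dict.contains_insert]
    simp
  rw [hA, COMM l2 _ c f (v + 1) hc hf h2]
  unfold bump
  rw [L_getD l2 _ c f h2]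
  have : ((rstep M ((c, f), v)).getD c PySem.Dict.empty).getD f 0 = v := by
    unfold rstep setv
    rw [PySem.Dict.getD_insert_self, PySem.Dict.getD_insert_self]
  rw [this]

theorem RS (cnt : PySem.Dict (String × String) Int) (c f : String)
    (h : (cnt.items.map (·.1)).Nodup) :
    ((cnt.insert (c, f) (cnt.getD (c, f) 0 + 1)).items).foldl rstep PySem.Dict.empty
      = bump (cnt.items.foldl rstep PySem.Dict.empty) c f := by
  by_cases hc : cnt.contains (c, f) = true
  · -- key present: split the item list around the unique entry with key (c,f)
    have hmem : ∃ p ∈ cnt.items, p.1 = (c, f) := by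
      unfold PySem.Dict.contains at hc
      obtain ⟨p, hp, hpk⟩ := List.any_eq_true.1 hc
      exact ⟨p, hp, by simpa using hpk⟩
    obtain ⟨p, hpmem, hpk⟩ := hmem
    obtain ⟨l1, l2, hsplit⟩ := List.append_of_mem hpmem
    have hp' : p = ((c, f), p.2) := by rw [← hpk]
    have hsplit' : cnt.items = l1 ++ ((c, f), p.2) :: l2 := by rw [hsplit, ← hp']
    have hnodup := h
    rw [hsplit'] at hnodup
    simp only [List.map_append, List.map_cons, List.nodup_append, List.nodup_cons] at hnodup
    have hn1 : (c, f) ∉ l1.map (·.1) := by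
      intro hmem1
      exact hnodup.2.2 (c, f) hmem1 (c, f) (by simp) rfl
    have hn2 : (c, f) ∉ l2.map (·.1) := hnodup.2.1.1
    -- the looked-up value is p.2
    have hget : cnt.getD (c, f) 0 = p.2 := by
      unfold PySem.Dict.getD PySem.Dict.get?
      rw [hsplit', List.find?_append]
      have : l1.find? (fun q => q.1 == (c, f)) = none := by
        rw [List.find?_eq_none]
        intro q hq
        simp only [beq_iff_eq]
        intro hh
        exact hn1 (by rw [← hh]; exact List.mem_map_of_mem hq)
      rw [this]
      simp
    -- items of the insert: value replaced in place
    have hins : (cnt.insert (c, f) (cnt.getD (c, f) 0 + 1)).items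
        = l1 ++ ((c, f), p.2 + 1) :: l2 := by
      simp only [PySem.Dict.insert, hc, if_true]
      rw [hget, hsplit']
      simp only [List.map_append, List.map_cons]
      congr 1
      · conv_rhs => rw [← List.map_id l1]
        apply List.map_congr_left
        intro q hq
        rw [if_neg]
        · rfl
        · simp only [beq_iff_eq]
          intro hh
          exact hn1 (by rw [← hh]; exact List.mem_map_of_mem hq)
      · congr 1
        · simp
        · conv_rhs => rw [← List.map_id l2]
          apply List.map_congr_left
          intro q hq
          rw [if_neg]
          · rfl
          · simp only [beq_iff_eq]
            intro hh
            exact hn2 (by rw [← hh]; exact List.mem_map_of_mem hq)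
    rw [hins, hsplit']
    exact RS_mid l1 l2 c f p.2 hn2
  · -- key absent: the new entry is appended with count 1
    have hb : cnt.contains (c, f) = false := by simpa using hc
    have hget : cnt.getD (c, f) 0 = 0 := pv_getD_of_not_contains cnt (c, f) 0 hb
    have hins : (cnt.insert (c, f) (cnt.getD (c, f) 0 + 1)).items
        = cnt.items ++ [((c, f), 0 + 1)] := by
      simp only [PySem.Dict.insert, hb, Bool.false_eq_true, if_false, hget]
    have hnm : (c, f) ∉ cnt.items.map (·.1) := by
      intro hmem1
      obtain ⟨q, hq, hqk⟩ := List.mem_map.1 hmem1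
      have : cnt.contains (c, f) = true := by
        unfold PySem.Dict.contains
        exact List.any_eq_true.2 ⟨q, hq, by simpa using hqk⟩
      rw [this] at hb; cases hb
    rw [hins, List.foldl_append, List.foldl_cons, List.foldl_nil]
    unfold bump
    rw [L_getD cnt.items PySem.Dict.empty c f hnm]
    unfold rstep
    norm_num

theorem MAIN (ps : List (String × String)) :
    ps.foldl (fun n p => bump n p.1 p.2) PySem.Dict.empty
      = ((ps.foldl (fun d p => d.insert p (d.getD p 0 + 1)) PySem.Dict.empty).items).foldl
          rstep PySem.Dict.empty := by
  induction ps using List.reverseRecOn with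
  | nil => rfl
  | append_singleton ps p ih =>
    rw [List.foldl_append, List.foldl_append]
    simp only [List.foldl_cons, List.foldl_nil]
    have hcnt : ps.foldl (fun d p => d.insert p (d.getD p 0 + 1)) PySem.Dict.empty
        = PySem.Dict.counter ps := PySem.Dict.foldl_insert_getD_add_one_eq_counter ps
    have hnodup : (((ps.foldl (fun d p => d.insert p (d.getD p 0 + 1))
        (PySem.Dict.empty : PySem.Dict (String × String) Int)).items).map (·.1)).Nodup := by
      rw [hcnt]
      have := PySem.Dict.nodup_keys_counter ps
      simpa [PySem.Dict.keys] using this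
    have := RS (ps.foldl (fun d p => d.insert p (d.getD p 0 + 1)) PySem.Dict.empty)
        p.1 p.2 hnodup
    rw [ih]
    rw [← this]

theorem stepA_eq (nest : NDict) (c f : String) :
    (let nest1 := if !nest.contains c then nest.insert c PySem.Dict.empty else nest;
     let d := nest1.getD c PySem.Dict.empty;
     let nest2 := if !d.contains f then nest1.insert c (d.insert f 0) else nest1;
     let d2 := nest2.getD c PySem.Dict.empty;
     nest2.insert c (d2.insert f (d2.getD f 0 + 1))) = bump nest c f := by
  by_cases hc : nest.contains c = true
  · simp only [hc, Bool.not_true, Bool.false_eq_true, if_false]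
    by_cases hf : (nest.getD c PySem.Dict.empty).contains f = true
    · simp only [hf, Bool.not_true, Bool.false_eq_true, if_false]
      rfl
    · have hfb : (nest.getD c PySem.Dict.empty).contains f = false := by simpa using hf
      simp only [hfb, Bool.not_false, if_true]
      rw [PySem.Dict.getD_insert_self, PySem.Dict.getD_insert_self,
          pv_insert_insert, pv_insert_insert]
      unfold bump setv
      rw [pv_getD_of_not_contains _ _ _ hfb]
  · have hcb : nest.contains c = false := by simpa using hc
    simp only [hcb, Bool.not_false, if_true]
    rw [PySem.Dict.getD_insert_self]
    have he : (PySem.Dict.empty : PySem.Dict String Int).contains f = false := rfl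
    simp only [he, Bool.not_false, if_true]
    rw [pv_insert_insert, PySem.Dict.getD_insert_self, PySem.Dict.getD_insert_self,
        pv_insert_insert]
    unfold bump setv
    rw [pv_getD_of_not_contains _ _ _ hcb, pv_insert_insert]
    rfl

theorem zip_tail_eq_map (ws : List String) :
    ws.zip ws.tail
      = (List.range (ws.length - 1)).map (fun k => (ws.getD k "", ws.getD (k + 1) "")) := by
  apply List.ext_getElem
  · simp [List.length_zip]
  · intro i h1 h2
    have hlen : i < ws.length - 1 := by
      simp [List.length_zip] at h1
      omega
    have hi1 : i < ws.length := by omega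
    have hi2 : i + 1 < ws.length := by omega
    have hit : i < ws.tail.length := by
      simp [List.length_tail]; omega
    rw [List.getElem_zip, List.getElem_map, List.getElem_range,
        List.getElem_tail, List.getD_eq_getElem _ _ hi1, List.getD_eq_getElem _ _ hi2]

theorem ZIPFOLD {σ : Type} (ws : List String) (g : σ → String → String → σ) (s : σ) :
    (PySem.List.pyRange 0 (PySem.List.len ws) 1).foldl (fun acc i =>
        if i + 1 < PySem.List.len ws then
          g acc (PySem.List.pyGetD ws i "") (PySem.List.pyGetD ws (i + 1) "")
        else acc) s
      = (ws.zip ws.tail).foldl (fun acc p => g acc p.1 p.2) s := by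
  cases ws with
  | nil =>
    rw [show PySem.List.len ([] : List String) = 0 from rfl]
    rw [PySem.List.pyRange_one_eq_nil le_rfl]
    rfl
  | cons w ws' =>
    have hlen : PySem.List.len (w :: ws') = (ws'.length : Int) + 1 := by
      simp [PySem.List.len]
    rw [hlen, PySem.List.pyRange_one_succ_right (by positivity), List.foldl_append]
    simp only [List.foldl_cons, List.foldl_nil]
    rw [if_neg (by omega)]
    rw [zip_tail_eq_map, List.foldl_map]
    have hlr : (w :: ws').length - 1 = ws'.length := by simp
    rw [hlr]
    rw [PySem.List.pyRange_one, List.foldl_map]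
    have : ((ws'.length : Int) - 0).toNat = ws'.length := by omega
    rw [this]
    apply PySem.List.foldl_congr_mem
    intro acc k hk
    have hk' : k < ws'.length := List.mem_range.1 hk
    rw [if_pos (by omega)]
    have e1 : PySem.List.pyGetD (w :: ws') (0 + (k : Int)) "" = (w :: ws').getD k "" := by
      rw [PySem.List.pyGetD_of_nonneg _ _ (by positivity)]
      congr 1
      omega
    have e2 : PySem.List.pyGetD (w :: ws') (0 + (k : Int) + 1) "" = (w :: ws').getD (k + 1) "" := by
      rw [PySem.List.pyGetD_of_nonneg _ _ (by positivity)]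
      congr 1
      omega
    rw [e1, e2]

-- ===== VERDICT (by name: the statement is the Claim_ definition above) =====
theorem compute_word_occurences_spec : Claim_equal_compute_word_occurences := by
  unfold Claim_equal_compute_word_occurences
  intro text _
  unfold Spec_compute_word_occurences compute_word_occurences compute_word_occurences_alt
  simp only [PySem.List.slice_from_one]
  congr 1
  congr 1
  exact (ZIPFOLD (PySem.Str.split₀ text)
      (fun nest curr foll =>
        let nest1 := if !nest.contains curr then nest.insert curr PySem.Dict.empty else nest;
        let d := nest1.getD curr PySem.Dict.empty;
        let nest2 := if !d.contains foll then nest1.insert curr (d.insert foll 0) else nest1;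
        let d2 := nest2.getD curr PySem.Dict.empty;
        nest2.insert curr (d2.insert foll (d2.getD foll 0 + 1)))
      PySem.Dict.empty).trans
    ((PySem.List.foldl_congr_mem _ _ _ _ (fun acc p _ => stepA_eq acc p.1 p.2)).trans
      (MAIN ((PySem.Str.split₀ text).zip (PySem.Str.split₀ text).tail)))
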